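-- pv_equiv track=rewrite | github.com/soominnn/Algorithms | 키패드누르기.py | solution
-- ===== SOURCE A (Python) =====
-- def find_num(btn,num):
--     for x in range(4):
--         for y in range(3):
--             if btn[x][y] == num:
--                 numX = x
--                 numY = y
--     return numX, numY
--
-- def solution(numbers, hand):
--     answer = ''
--     btn = [[1,2,3],[4,5,6],[7,8,9],['*',0,'#']]
--     pos_L_X = 3
--     pos_L_Y = 0
--     pos_R_X = 3
--     pos_R_Y = 2
--     for num in numbers:
--         numX, numY = find_num(btn,num)
--         if num == 1 or num == 4 or num == 7:
--             answer += 'L'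
--             pos_L_X = numX
--             pos_L_Y = numY
--         if num == 3 or num == 6 or num == 9:
--             answer += 'R'
--             pos_R_X = numX
--             pos_R_Y = numY
--         if num == 2 or num == 5 or num == 8 or num == 0:
--             l = abs(numX-pos_L_X)+abs(numY-pos_L_Y)
--             r = abs(numX-pos_R_X)+abs(numY-pos_R_Y)
--             if l < r:
--                 pos_L_X = numX
--                 pos_L_Y = numY
--                 answer += "L"
--             if l > r:
--                 pos_R_X = numX
--                 pos_R_Y = numY
--                 answer += "R"
--             if l == r:
--                 if hand == "right":
--                     pos_R_X = numX
--                     pos_R_Y = numY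
--                     answer += "R"
--                 else:
--                     pos_L_X = numX
--                     pos_L_Y = numY
--                     answer += "L"
--     return answer
-- ===== SOURCE B (Python) =====
-- # B compiles the keypad geometry into a 144-state transition table built once;
-- # the main loop is a pure table walk with no per-digit geometry or branching.
--
-- def _coord(p):
--     # position code: digits 0-9 on the keypad, 10 = initial '*', 11 = initial '#'
--     if p == 0:
--         return 3, 1
--     if p == 10:
--         return 3, 0
--     if p == 11:
--         return 3, 2
--     return (p - 1) // 3, (p - 1) % 3
--
-- def _build(tie):
--     # state = left * 12 + right (last position code of each thumb)
--     table = []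
--     for left in range(12):
--         for right in range(12):
--             row = []
--             for d in range(10):
--                 x, y = _coord(d)
--                 if y == 0:
--                     ch = 'L'
--                 elif y == 2:
--                     ch = 'R'
--                 else:
--                     lx, ly = _coord(left)
--                     rx, ry = _coord(right)
--                     l = abs(x - lx) + abs(y - ly)
--                     r = abs(x - rx) + abs(y - ry)
--                     ch = 'L' if l < r else ('R' if l > r else tie)
--                 row.append((ch, d * 12 + right if ch == 'L' else left * 12 + d))
--             table.append(row)
--     return table
--
-- _TBL_L = _build('L')
-- _TBL_R = _build('R')
--
-- def solution(numbers, hand):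
--     tbl = _TBL_R if hand == "right" else _TBL_L
--     s = 10 * 12 + 11
--     out = []
--     for d in numbers:
--         ch, s = tbl[s][d]
--         out.append(ch)
--     return ''.join(out)
-- ===== Notes on version B (the rewrite author's own statement) =====
-- stated objective: alternative
-- what changed: B compiles the keypad geometry into a 144-state finite transition table (state = last position of each thumb, one table per tie-breaking hand) built once at import; the main loop is a branch-free table walk reading (letter, next state) per digit, instead of A's per-digit 12-cell grid scan and distance/branch chain.
import Mathlib
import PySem

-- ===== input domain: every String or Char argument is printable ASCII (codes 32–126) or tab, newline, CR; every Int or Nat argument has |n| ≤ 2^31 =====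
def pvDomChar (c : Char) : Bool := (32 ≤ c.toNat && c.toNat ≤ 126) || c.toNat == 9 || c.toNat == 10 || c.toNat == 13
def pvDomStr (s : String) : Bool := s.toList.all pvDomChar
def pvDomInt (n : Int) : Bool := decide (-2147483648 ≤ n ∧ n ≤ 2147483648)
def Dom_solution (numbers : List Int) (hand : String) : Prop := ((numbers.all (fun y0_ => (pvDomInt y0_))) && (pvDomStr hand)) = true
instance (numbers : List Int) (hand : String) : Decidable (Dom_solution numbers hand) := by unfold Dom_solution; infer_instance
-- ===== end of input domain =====

-- B replaces A's per-digit grid scan and branch chain by a 144-state transition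
-- table built once; the main loop is a table walk (objective: alternative).


-- ===== PORT A =====
-- btn: '*' and '#' are not ints, so num == cell is False there; modelled as none.
def pvBtn : List (List (Option Int)) :=
  [[some 1, some 2, some 3], [some 4, some 5, some 6], [some 7, some 8, some 9], [none, some 0, none]]

-- find_num: nested scan; returns none when numX/numY stay unbound (UnboundLocalError).
def find_num (num : Int) : Option (Int × Int) :=
  (List.range 4).foldl (fun acc x =>
    (List.range 3).foldl (fun acc y =>
      if ((pvBtn.getD x []).getD y none) = some num then some ((x : Int), (y : Int)) else acc) acc) none

-- one iteration of A's loop body; none propagates the UnboundLocalError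
def pvStepA (hand : String) (st : Option (String × Int × Int × Int × Int)) (num : Int) :
    Option (String × Int × Int × Int × Int) :=
  match st with
  | none => none
  | some (ans, lx, ly, rx, ry) =>
    match find_num num with
    | none => none
    | some (nx, ny) =>
      let s1 : String × Int × Int × Int × Int :=
        if num = 1 ∨ num = 4 ∨ num = 7 then (ans ++ "L", nx, ny, rx, ry) else (ans, lx, ly, rx, ry)
      let s2 : String × Int × Int × Int × Int :=
        if num = 3 ∨ num = 6 ∨ num = 9 then (s1.1 ++ "R", s1.2.1, s1.2.2.1, nx, ny) else s1
      let s3 : String × Int × Int × Int × Int :=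
        if num = 2 ∨ num = 5 ∨ num = 8 ∨ num = 0 then
          let l : Int := |nx - s2.2.1| + |ny - s2.2.2.1|
          let r : Int := |nx - s2.2.2.2.1| + |ny - s2.2.2.2.2|
          if l < r then (s2.1 ++ "L", nx, ny, s2.2.2.2.1, s2.2.2.2.2)
          else if l > r then (s2.1 ++ "R", s2.2.1, s2.2.2.1, nx, ny)
          else if hand = "right" then (s2.1 ++ "R", s2.2.1, s2.2.2.1, nx, ny)
          else (s2.1 ++ "L", nx, ny, s2.2.2.2.1, s2.2.2.2.2)
        else s2
      some s3

def solution (numbers : List Int) (hand : String) : String :=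
  match numbers.foldl (pvStepA hand) (some ("", 3, 0, 3, 2)) with
  | some st => st.1
  | none => ""   -- unreachable under Pre_solution (Python raises UnboundLocalError there)

-- ===== PORT B =====
-- _coord: position code 0-9 = keypad digit, 10 = initial '*', 11 = initial '#'
def pvCoord (p : Int) : Int × Int :=
  if p = 0 then (3, 1)
  else if p = 10 then (3, 0)
  else if p = 11 then (3, 2)
  else (PySem.Int.floordiv (p - 1) 3, PySem.Int.mod (p - 1) 3)

-- _build: the 144-row transition table, state = left*12 + right
def pvBuild (tie : Char) : List (List (Char × Int)) :=
  (PySem.List.pyRange 0 12 1).foldl (fun table left =>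
    (PySem.List.pyRange 0 12 1).foldl (fun table right =>
      let row := (PySem.List.pyRange 0 10 1).foldl (fun row d =>
        let xy := pvCoord d
        let ch : Char :=
          if xy.2 = 0 then 'L'
          else if xy.2 = 2 then 'R'
          else
            let lxy := pvCoord left
            let rxy := pvCoord right
            let l : Int := |xy.1 - lxy.1| + |xy.2 - lxy.2|
            let r : Int := |xy.1 - rxy.1| + |xy.2 - rxy.2|
            if l < r then 'L' else if l > r then 'R' else tie
        row ++ [(ch, if ch = 'L' then d * 12 + right else left * 12 + d)]) []
      table ++ [row]) table) []

def pvTblL : List (List (Char × Int)) := pvBuild 'L'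
def pvTblR : List (List (Char × Int)) := pvBuild 'R'

-- one iteration of B's loop: a table walk; none propagates the IndexError
def pvStepB (tbl : List (List (Char × Int))) (st : Option (List Char × Int)) (d : Int) :
    Option (List Char × Int) :=
  match st with
  | none => none
  | some (out, s) =>
    match PySem.List.pyGet? tbl s with
    | none => none
    | some row =>
      match PySem.List.pyGet? row d with
      | none => none
      | some e => some (out ++ [e.1], e.2)

def solution_alt (numbers : List Int) (hand : String) : String :=
  let tbl := if hand = "right" then pvTblR else pvTblL
  match numbers.foldl (pvStepB tbl) (some ([], 10 * 12 + 11)) with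
  | some st => String.ofList st.1   -- ''.join(out)
  | none => ""   -- unreachable under Pre_solution (Python raises IndexError there)

-- ===== PRECONDITION & SPEC =====
-- Pre_ excludes exactly the inputs on which A raises UnboundLocalError (a digit outside 0..9).
def Pre_solution (numbers : List Int) (hand : String) : Prop :=
  ∀ n ∈ numbers, 0 ≤ n ∧ n ≤ 9
instance (numbers : List Int) (hand : String) : Decidable (Pre_solution numbers hand) := by
  unfold Pre_solution; infer_instance
def pvWitness_solution : List Int × String := ([1, 3, 4, 5, 8, 2, 1, 4, 5, 9, 5], "right")

def Spec_solution (numbers : List Int) (hand : String) (out : String) : Prop := out = solution_alt numbers hand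
instance (numbers : List Int) (hand : String) (out : String) : Decidable (Spec_solution numbers hand out) := by unfold Spec_solution; infer_instance

-- ===== CLAIM (what is proved, stated in full; the proofs are below) =====
def Claim_equal_solution : Prop := ∀ (numbers : List Int) (hand : String), Dom_solution numbers hand → Pre_solution numbers hand → Spec_solution numbers hand (solution numbers hand)

-- ===== LEMMAS AND PROOFS =====
-- proof-only reference step on state labels: (letter, new left code, new right code)
def refStep (tie : Char) (L R d : Int) : Char × Int × Int :=
  let xy := pvCoord d
  let ch : Char :=
    if xy.2 = 0 then 'L'
    else if xy.2 = 2 then 'R'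
    else
      let lxy := pvCoord L
      let rxy := pvCoord R
      let l : Int := |xy.1 - lxy.1| + |xy.2 - lxy.2|
      let r : Int := |xy.1 - rxy.1| + |xy.2 - rxy.2|
      if l < r then 'L' else if l > r then 'R' else tie
  if ch = 'L' then (ch, d, R) else (ch, L, d)

theorem mem_rngI {n k : Int} (h0 : 0 ≤ n) (h : n < k) : n ∈ PySem.List.pyRange 0 k 1 :=
  PySem.List.mem_pyRange_one.mpr ⟨h0, h⟩

-- the table realises refStep on all 144 states and 10 digits: one finite check per hand
set_option maxRecDepth 10000 in
theorem table_eval_L : ∀ L ∈ PySem.List.pyRange 0 12 1, ∀ R ∈ PySem.List.pyRange 0 12 1, ∀ d ∈ PySem.List.pyRange 0 10 1,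
    ((PySem.List.pyGet? pvTblL (L * 12 + R)).bind (fun row => PySem.List.pyGet? row d)) =
      some ((refStep 'L' L R d).1, (refStep 'L' L R d).2.1 * 12 + (refStep 'L' L R d).2.2) := by decide

set_option maxRecDepth 10000 in
theorem table_eval_R : ∀ L ∈ PySem.List.pyRange 0 12 1, ∀ R ∈ PySem.List.pyRange 0 12 1, ∀ d ∈ PySem.List.pyRange 0 10 1,
    ((PySem.List.pyGet? pvTblR (L * 12 + R)).bind (fun row => PySem.List.pyGet? row d)) =
      some ((refStep 'R' L R d).1, (refStep 'R' L R d).2.1 * 12 + (refStep 'R' L R d).2.2) := by decide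

set_option maxRecDepth 10000 in
theorem refStep_bounds_L : ∀ L ∈ PySem.List.pyRange 0 12 1, ∀ R ∈ PySem.List.pyRange 0 12 1, ∀ d ∈ PySem.List.pyRange 0 10 1,
    (0 ≤ (refStep 'L' L R d).2.1 ∧ (refStep 'L' L R d).2.1 < 12) ∧
      (0 ≤ (refStep 'L' L R d).2.2 ∧ (refStep 'L' L R d).2.2 < 12) := by decide

set_option maxRecDepth 10000 in
theorem refStep_bounds_R : ∀ L ∈ PySem.List.pyRange 0 12 1, ∀ R ∈ PySem.List.pyRange 0 12 1, ∀ d ∈ PySem.List.pyRange 0 10 1,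
    (0 ≤ (refStep 'R' L R d).2.1 ∧ (refStep 'R' L R d).2.1 < 12) ∧
      (0 ≤ (refStep 'R' L R d).2.2 ∧ (refStep 'R' L R d).2.2 < 12) := by decide

theorem find_num_eval (num : Int) (h0 : 0 ≤ num) (h9 : num ≤ 9) :
    find_num num = some (pvCoord num) := by
  interval_cases num <;> decide

theorem pvCoord_0 : pvCoord 0 = (3, 1) := by decide
theorem pvCoord_1 : pvCoord 1 = (0, 0) := by decide
theorem pvCoord_2 : pvCoord 2 = (0, 1) := by decide
theorem pvCoord_3 : pvCoord 3 = (0, 2) := by decide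
theorem pvCoord_4 : pvCoord 4 = (1, 0) := by decide
theorem pvCoord_5 : pvCoord 5 = (1, 1) := by decide
theorem pvCoord_6 : pvCoord 6 = (1, 2) := by decide
theorem pvCoord_7 : pvCoord 7 = (2, 0) := by decide
theorem pvCoord_8 : pvCoord 8 = (2, 1) := by decide
theorem pvCoord_9 : pvCoord 9 = (2, 2) := by decide
theorem ofL : String.ofList ['L'] = "L" := by decide
theorem RneL : ('R' : Char) ≠ 'L' := by decide
theorem ofR : String.ofList ['R'] = "R" := by decide

-- A's loop body realises refStep on coordinate states
theorem stepA_eq (hand : String) (ans : String) (L R d : Int)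
    (hd0 : 0 ≤ d) (hd : d ≤ 9) :
    pvStepA hand (some (ans, (pvCoord L).1, (pvCoord L).2, (pvCoord R).1, (pvCoord R).2)) d =
      some (ans ++ String.ofList [(refStep (if hand = "right" then 'R' else 'L') L R d).1],
        (pvCoord ((refStep (if hand = "right" then 'R' else 'L') L R d).2.1)).1,
        (pvCoord ((refStep (if hand = "right" then 'R' else 'L') L R d).2.1)).2,
        (pvCoord ((refStep (if hand = "right" then 'R' else 'L') L R d).2.2)).1,
        (pvCoord ((refStep (if hand = "right" then 'R' else 'L') L R d).2.2)).2) := by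
  have hf : find_num d = some (pvCoord d) := find_num_eval d hd0 hd
  by_cases hh : hand = "right" <;>
    interval_cases d <;>
      simp only [pvStepA, hf, refStep, hh] <;>
      norm_num [pvCoord_0, pvCoord_1, pvCoord_2, pvCoord_3, pvCoord_4, pvCoord_5,
        pvCoord_6, pvCoord_7, pvCoord_8, pvCoord_9, ofL, ofR, RneL] <;>
      try (split_ifs <;>
        simp_all [pvCoord_0, pvCoord_2, pvCoord_5, pvCoord_8, ofL, ofR] <;> omega)

theorem fold_eq (hand : String) (numbers : List Int) (h : ∀ n ∈ numbers, 0 ≤ n ∧ n ≤ 9)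
    (out : List Char) (L R : Int) (hL0 : 0 ≤ L) (hL : L < 12) (hR0 : 0 ≤ R) (hR : R < 12) :
    numbers.foldl (pvStepA hand)
        (some (String.ofList out, (pvCoord L).1, (pvCoord L).2, (pvCoord R).1, (pvCoord R).2)) =
      ((numbers.foldl (pvStepB (if hand = "right" then pvTblR else pvTblL))
          (some (out, L * 12 + R))).map
        (fun st => (String.ofList st.1,
          (pvCoord (st.2 / 12)).1, (pvCoord (st.2 / 12)).2,
          (pvCoord (st.2 % 12)).1, (pvCoord (st.2 % 12)).2))) := by
  induction numbers generalizing out L R with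
  | nil =>
    have h1 : (L * 12 + R) / 12 = L := by omega
    have h2 : (L * 12 + R) % 12 = R := by omega
    simp [h1, h2]
  | cons d ds ih =>
    have hd := h d (List.mem_cons_self ..)
    set tie : Char := if hand = "right" then 'R' else 'L' with htie
    have hstep : ((PySem.List.pyGet? (if hand = "right" then pvTblR else pvTblL) (L * 12 + R)).bind
        (fun row => PySem.List.pyGet? row d)) =
        some ((refStep tie L R d).1,
          (refStep tie L R d).2.1 * 12 + (refStep tie L R d).2.2) := by
      by_cases hh : hand = "right"
      · simpa [htie, hh] using table_eval_R L (mem_rngI hL0 hL) R (mem_rngI hR0 hR)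
          d (mem_rngI hd.1 (by omega))
      · simpa [htie, hh] using table_eval_L L (mem_rngI hL0 hL) R (mem_rngI hR0 hR)
          d (mem_rngI hd.1 (by omega))
    have hbnd : (0 ≤ (refStep tie L R d).2.1 ∧ (refStep tie L R d).2.1 < 12) ∧
        (0 ≤ (refStep tie L R d).2.2 ∧ (refStep tie L R d).2.2 < 12) := by
      by_cases hh : hand = "right"
      · simpa [htie, hh] using refStep_bounds_R L (mem_rngI hL0 hL) R (mem_rngI hR0 hR)
          d (mem_rngI hd.1 (by omega))
      · simpa [htie, hh] using refStep_bounds_L L (mem_rngI hL0 hL) R (mem_rngI hR0 hR)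
          d (mem_rngI hd.1 (by omega))
    obtain ⟨row, hrow, hent⟩ := Option.bind_eq_some_iff.mp hstep
    have hB : pvStepB (if hand = "right" then pvTblR else pvTblL) (some (out, L * 12 + R)) d =
        some (out ++ [(refStep tie L R d).1],
          (refStep tie L R d).2.1 * 12 + (refStep tie L R d).2.2) := by
      simp [pvStepB, hrow, hent]
    have hA := stepA_eq hand (String.ofList out) L R d hd.1 hd.2
    rw [List.foldl_cons, List.foldl_cons, hA, hB, ← htie, ← String.ofList_append]
    exact ih (fun n hn => h n (List.mem_cons_of_mem _ hn)) (out ++ [(refStep tie L R d).1])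
      (refStep tie L R d).2.1 (refStep tie L R d).2.2
      hbnd.1.1 hbnd.1.2 hbnd.2.1 hbnd.2.2

-- ===== VERDICT (by name: the statement is the Claim_ definition above) =====
theorem solution_spec : Claim_equal_solution := by
  intro numbers hand _ hpre
  unfold Spec_solution solution solution_alt
  have hinit : (("" : String), (3 : Int), (0 : Int), (3 : Int), (2 : Int)) =
      (String.ofList [], (pvCoord 10).1, (pvCoord 10).2, (pvCoord 11).1, (pvCoord 11).2) := by
    decide
  rw [hinit, fold_eq hand numbers hpre [] 10 11 (by norm_num) (by norm_num) (by norm_num) (by norm_num)]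
  have h131 : (10 * 12 + 11 : Int) = 131 := by norm_num
  rw [h131]
  cases hB : numbers.foldl (pvStepB (if hand = "right" then pvTblR else pvTblL))
      (some ([], 131)) <;> simp [hB]
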